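-- pv_equiv track=rewrite | github.com/mou23/CoSIL-ASE | evaluation/transformLocAgent.py | extract_locations_from_entities
-- ===== SOURCE A (Python) =====
-- def extract_locations_from_entities(entities):
--     found_related_locs = {}
--     for entity in entities:
--         file_path, func_name = entity.split(':', 1)
--         if file_path not in found_related_locs:
--             found_related_locs[file_path] = []
--         found_related_locs[file_path].append(f"function: {func_name}")
--     for k, v in found_related_locs.items():
--         found_related_locs[k] = ["\n".join(v)]
--     return found_related_locs
-- ===== SOURCE B (Python) =====
-- def extract_locations_from_entities(entities):
--     # Single pass: maintain the final newline-joined string per file incrementally,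
--     # instead of accumulating a list of parts and joining them in a second pass.
--     found_related_locs = {}
--     for entity in entities:
--         file_path, func_name = entity.split(':', 1)
--         line = f"function: {func_name}"
--         if file_path in found_related_locs:
--             found_related_locs[file_path][0] += "\n" + line
--         else:
--             found_related_locs[file_path] = [line]
--     return found_related_locs
-- ===== Notes on version B (the rewrite author's own statement) =====
-- stated objective: simpler
-- what changed: B builds the final one-element [joined-string] value incrementally in a single pass (appending "\n"+line to the existing string), eliminating A's intermediate per-key list of parts and A's whole second join-and-rewrite pass over the dict.
-- outside the precondition, e.g. on extract_locations_from_entities(['nocolon']): A raises ValueError, B raises ValueError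
import Mathlib
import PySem

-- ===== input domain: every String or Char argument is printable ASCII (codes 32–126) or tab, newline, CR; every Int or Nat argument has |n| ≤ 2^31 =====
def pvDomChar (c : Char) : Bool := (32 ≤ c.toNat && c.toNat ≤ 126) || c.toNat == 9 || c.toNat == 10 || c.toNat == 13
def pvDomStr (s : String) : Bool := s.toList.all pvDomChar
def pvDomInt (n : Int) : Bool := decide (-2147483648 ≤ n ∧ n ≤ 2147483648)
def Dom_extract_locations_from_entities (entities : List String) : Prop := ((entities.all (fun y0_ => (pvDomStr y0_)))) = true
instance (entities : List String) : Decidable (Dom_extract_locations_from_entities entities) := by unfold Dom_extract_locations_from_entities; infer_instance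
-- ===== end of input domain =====

-- B maintains the final newline-joined one-element value per key in a single pass,
-- removing A's intermediate list of parts and A's whole second join pass over the dict.


-- ===== PORT A =====
-- loop body of A's first pass (the '_' branch is unreachable inside Pre_: there Python raises ValueError)
def pvStepA (d : PySem.Dict String (List String)) (entity : String) : PySem.Dict String (List String) :=
  match PySem.Str.splitMax? entity ":" 1 with
  | some [file_path, func_name] =>
      (if d.contains file_path then d else d.insert file_path []).modify file_path []
        (fun fns => fns ++ ["function: " ++ func_name])
  | _ => d

def extract_locations_from_entities (entities : List String) : List (String × List String) :=
  let found_related_locs := entities.foldl pvStepA PySem.Dict.empty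
  -- second pass: found_related_locs[k] = ["\n".join(v)] for each existing item
  (found_related_locs.items.foldl
    (fun d kv => d.insert kv.1 [PySem.Str.join "\n" kv.2]) found_related_locs).items

-- ===== PORT B =====
-- loop body of B: the joined string is kept incrementally; the 'nil' value branch is
-- unreachable (every stored value is a one-element list), the '_' split branch as in A
def pvStepB (d : PySem.Dict String (List String)) (entity : String) : PySem.Dict String (List String) :=
  match PySem.Str.splitMax? entity ":" 1 with
  | some [file_path, func_name] =>
      let line := "function: " ++ func_name
      if d.contains file_path then
        d.modify file_path [] (fun v => match v with
          | s :: rest => (s ++ "\n" ++ line) :: rest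
          | [] => [])
      else d.insert file_path [line]
  | _ => d

def extract_locations_from_entities_alt (entities : List String) : List (String × List String) :=
  (entities.foldl pvStepB PySem.Dict.empty).items

-- ===== PRECONDITION & SPEC =====
-- Pre_ excludes entities without a ':' — there Python A (and B) raise ValueError on tuple unpacking.
def Pre_extract_locations_from_entities (entities : List String) : Prop :=
  (entities.all (fun e => PySem.Str.isIn ":" e)) = true
instance (entities : List String) : Decidable (Pre_extract_locations_from_entities entities) := by
  unfold Pre_extract_locations_from_entities; infer_instance

def pvWitness_extract_locations_from_entities : List String :=
  ["a.py:foo", "b.py:bar", "a.py:baz:qux"]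

def Spec_extract_locations_from_entities (entities : List String) (out : List (String × List String)) : Prop := out = extract_locations_from_entities_alt entities
instance (entities : List String) (out : List (String × List String)) : Decidable (Spec_extract_locations_from_entities entities out) := by unfold Spec_extract_locations_from_entities; infer_instance

-- ===== CLAIM (what is proved, stated in full; the proofs are below) =====
def Claim_equal_extract_locations_from_entities : Prop := ∀ (entities : List String), Dom_extract_locations_from_entities entities → Pre_extract_locations_from_entities entities → Spec_extract_locations_from_entities entities (extract_locations_from_entities entities)

-- ===== LEMMAS AND PROOFS =====

-- the item transformation A's second pass performs and B maintains incrementally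
def pvF (p : String × List String) : String × List String := (p.1, [PySem.Str.join "\n" p.2])

theorem pv_join_singleton (s : String) : PySem.Str.join "\n" [s] = s := by
  apply String.toList_inj.mp
  simp [PySem.Str.toList_join, PySem.Chars.join, List.intercalate]

theorem pv_ic (sep : List Char) : ∀ (v : List (List Char)) (a x : List Char),
    sep.intercalate ((a :: v) ++ [x]) = sep.intercalate (a :: v) ++ sep ++ x := by
  intro v
  induction v with
  | nil => intro a x; simp [List.intercalate]
  | cons b rest ih =>
      intro a x
      simp only [List.intercalate, List.cons_append, List.intersperse] at *
      simp [List.flatten, ih b x, List.append_assoc]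

theorem pv_join_snoc (v : List String) (hv : v ≠ []) (s : String) :
    PySem.Str.join "\n" (v ++ [s]) = PySem.Str.join "\n" v ++ "\n" ++ s := by
  obtain ⟨a, w, rfl⟩ := List.exists_cons_of_ne_nil hv
  apply String.toList_inj.mp
  simp only [PySem.Str.toList_join, PySem.Chars.join, List.map_append, List.map_cons,
    List.map_nil, String.toList_append, List.cons_append]
  have := pv_ic ['\n'] (List.map String.toList w) a.toList s.toList
  simpa using this

theorem pv_get?_mk_map (l : List (String × List String)) (k : String) :
    (PySem.Dict.mk (l.map pvF)).get? k = ((PySem.Dict.mk l).get? k).map (fun v => [PySem.Str.join "\n" v]) := by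
  induction l with
  | nil => rfl
  | cons p rest ih =>
      simp only [List.map_cons, pvF]
      rw [PySem.Dict.get?_mk_cons, PySem.Dict.get?_mk_cons]
      by_cases h : (p.1 == k) = true <;> simp [h, ih]

theorem pv_contains_mk_map (l : List (String × List String)) (k : String) :
    (PySem.Dict.mk (l.map pvF)).contains k = (PySem.Dict.mk l).contains k := by
  simp [PySem.Dict.contains_mk, List.any_map, Function.comp_def, pvF]

theorem pv_insert_mk_map (l : List (String × List String)) (k : String) (v : List String) :
    (PySem.Dict.mk (l.map pvF)).insert k [PySem.Str.join "\n" v]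
      = PySem.Dict.mk ((((PySem.Dict.mk l).insert k v)).items.map pvF) := by
  apply PySem.Dict.ext
  simp only [PySem.Dict.items_insert, pv_contains_mk_map]
  by_cases h : (PySem.Dict.mk l).contains k = true
  · simp only [h, if_true, List.map_map]
    apply List.map_congr_left
    intro p hp
    by_cases hpk : p.1 = k <;> simp [pvF, hpk]
  · simp [h, pvF]

theorem pv_step (dA : PySem.Dict String (List String)) (e : String)
    (hne : ∀ p ∈ dA.items, p.2 ≠ []) (hnd : dA.keys.Nodup) :
    pvStepB (PySem.Dict.mk (dA.items.map pvF)) e = PySem.Dict.mk ((pvStepA dA e).items.map pvF)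
      ∧ (∀ p ∈ (pvStepA dA e).items, p.2 ≠ []) ∧ (pvStepA dA e).keys.Nodup := by
  unfold pvStepA pvStepB
  rcases h : PySem.Str.splitMax? e ":" 1 with _ | l
  · exact ⟨rfl, hne, hnd⟩
  · match l with
    | [] => exact ⟨rfl, hne, hnd⟩
    | [a] => exact ⟨rfl, hne, hnd⟩
    | a :: b :: c :: t => exact ⟨rfl, hne, hnd⟩
    | [fp, fn] =>
        simp only
        have hcB := pv_contains_mk_map dA.items fp
        by_cases hcon : dA.contains fp = true
        · obtain ⟨v, hv⟩ : ∃ v, dA.get? fp = some v := by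
            rw [PySem.Dict.contains_eq_isSome_get?] at hcon
            exact Option.isSome_iff_exists.mp hcon
          have hvne : v ≠ [] := hne (fp, v) (PySem.Dict.mem_items_of_get?_eq_some dA hv)
          have hgA : dA.getD fp [] = v := PySem.Dict.getD_of_get?_eq_some dA [] hv
          have hgB : (PySem.Dict.mk (dA.items.map pvF)).getD fp [] = [PySem.Str.join "\n" v] := by
            rw [PySem.Dict.getD_eq_get?_getD, pv_get?_mk_map, hv]; rfl
          obtain ⟨v0, vr, rfl⟩ := List.exists_cons_of_ne_nil hvne
          refine ⟨?_, ?_, ?_⟩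
          · rw [hcB, if_pos hcon, if_pos hcon]
            simp only [PySem.Dict.modify, hgA, hgB]
            rw [← pv_join_snoc (v0 :: vr) hvne ("function: " ++ fn)]
            exact pv_insert_mk_map dA.items fp ((v0 :: vr) ++ ["function: " ++ fn])
          · rw [if_pos hcon]
            simp only [PySem.Dict.modify, hgA]
            intro p hp
            rcases (PySem.Dict.mem_items_insert _ _ _ _).mp hp with h1 | h2
            · subst h1; simp
            · exact hne p h2.1
          · rw [if_pos hcon]
            simp only [PySem.Dict.modify]
            exact PySem.Dict.nodup_keys_insert _ _ _ hnd
        · refine ⟨?_, ?_, ?_⟩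
          · rw [hcB, if_neg hcon, if_neg hcon]
            simp only [PySem.Dict.modify, PySem.Dict.getD_insert_self, List.nil_append,
              PySem.Dict.insert_insert_self]
            have hins := pv_insert_mk_map dA.items fp ["function: " ++ fn]
            rw [pv_join_singleton] at hins
            exact hins
          · rw [if_neg hcon]
            simp only [PySem.Dict.modify, PySem.Dict.getD_insert_self, List.nil_append,
              PySem.Dict.insert_insert_self]
            intro p hp
            rcases (PySem.Dict.mem_items_insert _ _ _ _).mp hp with h1 | h2
            · subst h1; simp
            · exact hne p h2.1
          · rw [if_neg hcon]
            simp only [PySem.Dict.modify, PySem.Dict.getD_insert_self, List.nil_append,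
              PySem.Dict.insert_insert_self]
            exact PySem.Dict.nodup_keys_insert _ _ _ hnd

theorem pv_loop (es : List String) : ∀ (dA : PySem.Dict String (List String)),
    (∀ p ∈ dA.items, p.2 ≠ []) → dA.keys.Nodup →
    es.foldl pvStepB (PySem.Dict.mk (dA.items.map pvF))
        = PySem.Dict.mk ((es.foldl pvStepA dA).items.map pvF)
      ∧ (∀ p ∈ (es.foldl pvStepA dA).items, p.2 ≠ [])
      ∧ (es.foldl pvStepA dA).keys.Nodup := by
  induction es with
  | nil => intro dA hne hnd; exact ⟨rfl, hne, hnd⟩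
  | cons e rest ih =>
      intro dA hne hnd
      obtain ⟨hstep, hne', hnd'⟩ := pv_step dA e hne hnd
      simp only [List.foldl_cons, hstep]
      exact ih (pvStepA dA e) hne' hnd'

theorem pv_second_pass (l : List (String × List String)) : ∀ (d : PySem.Dict String (List String)),
    d.keys.Nodup → (∀ p ∈ l, p ∈ d.items) → (l.map Prod.fst).Nodup →
    (l.foldl (fun d kv => d.insert kv.1 [PySem.Str.join "\n" kv.2]) d).items
      = d.items.map (fun q => if q.1 ∈ l.map Prod.fst then pvF q else q) := by
  induction l with
  | nil => intro d _ _ _; simp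
  | cons p rest ih =>
      intro d hnd hsub hl
      have hpmem : p ∈ d.items := hsub p (List.mem_cons_self ..)
      have hc : d.contains p.1 = true := by
        rw [PySem.Dict.contains_iff_mem_keys]
        simp only [PySem.Dict.keys]
        exact List.mem_map_of_mem hpmem
      have hpnotin : p.1 ∉ rest.map Prod.fst := by
        simp only [List.map_cons, List.nodup_cons] at hl; exact hl.1
      have hrestnd : (rest.map Prod.fst).Nodup := by
        simp only [List.map_cons, List.nodup_cons] at hl; exact hl.2
      have hitems' : (d.insert p.1 [PySem.Str.join "\n" p.2]).items
          = d.items.map (fun q => if (q.1 == p.1) = true then (p.1, [PySem.Str.join "\n" p.2]) else q) := by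
        rw [PySem.Dict.items_insert]; simp [hc]
      have hinj : ∀ x ∈ d.items, ∀ y ∈ d.items, x.1 = y.1 → x = y := by
        intro x hx y hy hxy
        have : (d.items.map Prod.fst).Nodup := by
          simpa only [PySem.Dict.keys] using hnd
        exact List.inj_on_of_nodup_map this hx hy hxy
      rw [List.foldl_cons]
      rw [ih (d.insert p.1 [PySem.Str.join "\n" p.2])
            (PySem.Dict.nodup_keys_insert _ _ _ hnd)
            (by
              intro r hr
              rw [hitems']
              refine List.mem_map.mpr ⟨r, hsub r (List.mem_cons_of_mem _ hr), ?_⟩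
              have : ¬ (r.1 == p.1) = true := by
                simp only [beq_iff_eq]
                intro hrp
                exact hpnotin (hrp ▸ List.mem_map_of_mem hr)
              simp [this])
            hrestnd]
      rw [hitems', List.map_map]
      apply List.map_congr_left
      intro q hq
      by_cases hqp : q.1 = p.1
      · have hqeq : q = p := hinj q hq p hpmem hqp
        subst hqeq
        simp [pvF, hpnotin]
      · simp only [Function.comp_apply, beq_iff_eq, List.map_cons, List.mem_cons,
          hqp, false_or, if_false]

-- ===== VERDICT (by name: the statement is the Claim_ definition above) =====
theorem extract_locations_from_entities_spec : Claim_equal_extract_locations_from_entities := by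
  intro entities _ _
  unfold Spec_extract_locations_from_entities extract_locations_from_entities extract_locations_from_entities_alt
  obtain ⟨hB, hne, hnd⟩ := pv_loop entities PySem.Dict.empty (by intro p hp; cases hp) PySem.Dict.nodup_keys_empty
  have hBe : entities.foldl pvStepB PySem.Dict.empty
      = PySem.Dict.mk ((entities.foldl pvStepA PySem.Dict.empty).items.map pvF) := hB
  rw [hBe]
  rw [pv_second_pass _ _ hnd (fun p hp => hp) (by simpa only [PySem.Dict.keys] using hnd)]
  apply List.map_congr_left
  intro q hq
  rw [if_pos (List.mem_map_of_mem hq)]
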